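-- pv_equiv track=rewrite | github.com/vindn/vad_framework | src/impact_assessment.py | replace_list_attributes_names_for_eng
-- ===== SOURCE A (Python) =====
-- def replace_list_attributes_names_for_eng( l ):
--     columns={'dist_costa_normalizado': 'coast_dist',
--                 'dentro_apa': 'inside_mpa',
--                 'cog_diff_norm': 'cog_diff',
--                 'dentro_mt': 'inside_ts',
--                 'dentro_zee': 'inside_eez',
--                 'sog_diff_norm': 'sog_diff'
--                 }
--
--     for k, it in columns.items():
--         for i in range(len(l)):
--             if k == l[i]:
--                 l[i] = it
--
--     return l
-- ===== SOURCE B (Python) =====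
-- def replace_list_attributes_names_for_eng(l):
--     # single in-place pass; per-element if-chain instead of six full scans
--     def rename(x):
--         if x == 'dist_costa_normalizado':
--             return 'coast_dist'
--         if x == 'dentro_apa':
--             return 'inside_mpa'
--         if x == 'cog_diff_norm':
--             return 'cog_diff'
--         if x == 'dentro_mt':
--             return 'inside_ts'
--         if x == 'dentro_zee':
--             return 'inside_eez'
--         if x == 'sog_diff_norm':
--             return 'sog_diff'
--         return x
--     i = 0
--     while i < len(l):
--         l[i] = rename(l[i])
--         i += 1
--     return l
-- ===== Notes on version B (the rewrite author's own statement) =====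
-- stated objective: simpler
-- what changed: Replaces the nested loops (six full scans of the list, one per mapping entry, driven by a dict) with a single in-place pass whose per-element rename is an early-return if-chain; the mapping's keys and values are disjoint, so one conditional rename per element equals the six sequential replacements.
import Mathlib
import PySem

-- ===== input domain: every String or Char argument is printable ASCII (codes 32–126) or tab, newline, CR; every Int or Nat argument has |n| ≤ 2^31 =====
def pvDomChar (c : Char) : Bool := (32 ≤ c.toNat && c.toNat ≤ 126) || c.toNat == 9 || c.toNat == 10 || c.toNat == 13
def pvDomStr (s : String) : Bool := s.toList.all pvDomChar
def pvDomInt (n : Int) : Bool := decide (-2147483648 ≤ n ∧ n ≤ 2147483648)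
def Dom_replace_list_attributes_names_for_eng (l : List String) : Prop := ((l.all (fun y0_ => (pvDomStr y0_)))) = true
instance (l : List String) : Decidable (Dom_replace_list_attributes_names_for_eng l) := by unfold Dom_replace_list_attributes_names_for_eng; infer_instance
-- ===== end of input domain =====

-- B changes only the traversal (one in-place pass with a per-element if-chain instead of six
-- full scans); both A and B mutate l in place in Python, the theorems are about the return value.

-- ===== PORT A =====
-- A: for each (k, it) of the fixed mapping dict, scan the whole list replacing k by it.
def pvColumnsA : List (String × String) :=
  [("dist_costa_normalizado", "coast_dist"),
   ("dentro_apa", "inside_mpa"),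
   ("cog_diff_norm", "cog_diff"),
   ("dentro_mt", "inside_ts"),
   ("dentro_zee", "inside_eez"),
   ("sog_diff_norm", "sog_diff")]

def replace_list_attributes_names_for_eng (l : List String) : List String :=
  pvColumnsA.foldl (fun acc p => acc.map (fun x => if p.1 == x then p.2 else x)) l

-- ===== PORT B =====
-- B: early-return if-chain renaming one element.
def pvRename (x : String) : String :=
  if x == "dist_costa_normalizado" then "coast_dist"
  else if x == "dentro_apa" then "inside_mpa"
  else if x == "cog_diff_norm" then "cog_diff"
  else if x == "dentro_mt" then "inside_ts"
  else if x == "dentro_zee" then "inside_eez"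
  else if x == "sog_diff_norm" then "sog_diff"
  else x

-- B: one pass over the list, renaming each element in turn.
def replace_list_attributes_names_for_eng_alt : List String → List String
  | [] => []
  | x :: xs => pvRename x :: replace_list_attributes_names_for_eng_alt xs

-- ===== PRECONDITION & SPEC =====
def Spec_replace_list_attributes_names_for_eng (l : List String) (out : List String) : Prop := out = replace_list_attributes_names_for_eng_alt l
instance (l : List String) (out : List String) : Decidable (Spec_replace_list_attributes_names_for_eng l out) := by unfold Spec_replace_list_attributes_names_for_eng; infer_instance

-- ===== CLAIM =====
def Claim_equal_replace_list_attributes_names_for_eng : Prop := ∀ (l : List String), Dom_replace_list_attributes_names_for_eng l → Spec_replace_list_attributes_names_for_eng l (replace_list_attributes_names_for_eng l)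

-- ===== LEMMAS AND PROOFS =====

-- A as a single map of the six-fold composed replacement
theorem pv_fold_map (l : List String) :
    replace_list_attributes_names_for_eng l =
      l.map (pvColumnsA.foldl (fun (f : String → String) p =>
        fun y => if p.1 == f y then p.2 else f y) id) := by
  simp [replace_list_attributes_names_for_eng, pvColumnsA, List.foldl, List.map_map,
    Function.comp_def]

-- pointwise: the six sequential replacements applied to one element equal B's if-chain
theorem pv_pointwise (x : String) :
    (pvColumnsA.foldl (fun (f : String → String) p =>
        fun y => if p.1 == f y then p.2 else f y) id) x = pvRename x := by
  by_cases h1 : x = "dist_costa_normalizado"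
  · subst h1; rfl
  by_cases h2 : x = "dentro_apa"
  · subst h2; rfl
  by_cases h3 : x = "cog_diff_norm"
  · subst h3; rfl
  by_cases h4 : x = "dentro_mt"
  · subst h4; rfl
  by_cases h5 : x = "dentro_zee"
  · subst h5; rfl
  by_cases h6 : x = "sog_diff_norm"
  · subst h6; rfl
  simp only [pvColumnsA, List.foldl, id_eq, beq_iff_eq, pvRename]
  simp [Ne.symm h1, Ne.symm h2, Ne.symm h3, Ne.symm h4, Ne.symm h5, Ne.symm h6,
    h1, h2, h3, h4, h5, h6]

-- B is the map of pvRename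
theorem pv_alt_map (l : List String) :
    replace_list_attributes_names_for_eng_alt l = l.map pvRename := by
  induction l with
  | nil => rfl
  | cons x xs ih => simp [replace_list_attributes_names_for_eng_alt, ih]

-- ===== VERDICT =====
theorem replace_list_attributes_names_for_eng_spec : Claim_equal_replace_list_attributes_names_for_eng := by
  intro l _
  show replace_list_attributes_names_for_eng l = replace_list_attributes_names_for_eng_alt l
  rw [pv_fold_map, pv_alt_map]
  exact List.map_congr_left (fun x _ => pv_pointwise x)
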